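-- pv_equiv track=rewrite | github.com/Vania-Dev/posadasdecodigo | 06/06.py | separate_blocks
-- ===== SOURCE A (Python) =====
-- def separate_blocks(columns):
--     """
--     Recibe columnas (tuplas de caracteres) y agrupa en bloques
--     separando cuando hay una columna completamente vacía (solo espacios).
--     """
--     # Lista para almacenar todos los bloques
--     blocks = []
--     # Bloque actual en construcción
--     current = []
--
--     # Itera sobre cada columna
--     for col in columns:
--         # Si la columna solo contiene espacios, es un separador
--         if all(c == " " for c in col):
--             # Si hay un bloque actual, lo guarda
--             if current:
--                 blocks.append(current)
--                 current = []
--         else: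
--             # Agrega la columna al bloque actual
--             current.append(col)
--
--     # Agrega el último bloque si existe
--     if current:
--         blocks.append(current)
--
--     # Retorna la lista de bloques
--     return blocks
-- ===== SOURCE B (Python) =====
-- def separate_blocks(columns):
--     """Run-scanning re-implementation: skip separator columns, slice out each
--     maximal run of non-separator columns as one block."""
--     def is_sep(col):
--         return all(c == " " for c in col)
--
--     blocks = []
--     i, n = 0, len(columns)
--     while i < n:
--         if is_sep(columns[i]):
--             i += 1
--         else:
--             j = i
--             while j < n and not is_sep(columns[j]):
--                 j += 1
--             blocks.append(list(columns[i:j]))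
--             i = j
--     return blocks
-- ===== Notes on version B (the rewrite author's own statement) =====
-- stated objective: alternative
-- what changed: Replaced A's current-block accumulator with flush-at-separator logic by a run-scanner that skips separator columns and slices each maximal non-separator run out as a whole block.
import Mathlib
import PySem

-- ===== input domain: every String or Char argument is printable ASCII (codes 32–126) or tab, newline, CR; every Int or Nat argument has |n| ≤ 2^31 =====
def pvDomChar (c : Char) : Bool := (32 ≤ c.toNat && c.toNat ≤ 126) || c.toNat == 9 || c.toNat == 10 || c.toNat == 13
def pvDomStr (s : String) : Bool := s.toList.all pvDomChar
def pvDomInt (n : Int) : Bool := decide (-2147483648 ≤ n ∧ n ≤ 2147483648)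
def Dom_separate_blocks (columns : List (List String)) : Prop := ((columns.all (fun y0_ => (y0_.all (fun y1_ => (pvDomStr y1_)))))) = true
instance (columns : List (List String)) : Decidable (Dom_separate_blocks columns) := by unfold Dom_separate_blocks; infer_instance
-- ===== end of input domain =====

-- B replaces A's accumulator-and-flush loop by a run-scanner that slices out maximal
-- non-separator runs (objective: alternative decomposition, same cost).


-- ===== PORT A =====
-- A's loop: fold over the columns carrying (blocks, current); a separator column
-- flushes a nonempty current, otherwise the column is appended to current.
def sbStep (st : List (List (List String)) × List (List String)) (col : List String) :
    List (List (List String)) × List (List String) :=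
  if col.all (fun c => c == " ") then
    if st.2 ≠ [] then (st.1 ++ [st.2], []) else st
  else
    (st.1, st.2 ++ [col])

def separate_blocks (columns : List (List String)) : List (List (List String)) :=
  let st := columns.foldl sbStep ([], [])
  if st.2 ≠ [] then st.1 ++ [st.2] else st.1

-- ===== PORT B =====
-- B's is_sep predicate
def sbIsSep (col : List String) : Bool := col.all (fun c => c == " ")

-- B's outer while loop: skip a separator column, otherwise take the maximal run of
-- non-separator columns (B's inner while loop + slice = span) as one block.
def separate_blocks_alt (columns : List (List String)) : List (List (List String)) :=
  match columns with
  | [] => []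
  | col :: rest =>
    if sbIsSep col then separate_blocks_alt rest
    else
      (col :: rest.takeWhile (fun c => !(sbIsSep c))) ::
        separate_blocks_alt (rest.dropWhile (fun c => !(sbIsSep c)))
termination_by columns.length
decreasing_by
  · simp
  · simpa using Nat.lt_succ_of_le (List.length_dropWhile_le _ _)

-- ===== PRECONDITION & SPEC =====
def Spec_separate_blocks (columns : List (List String)) (out : List (List (List String))) : Prop := out = separate_blocks_alt columns
instance (columns : List (List String)) (out : List (List (List String))) : Decidable (Spec_separate_blocks columns out) := by unfold Spec_separate_blocks; infer_instance

-- ===== CLAIM (what is proved, stated in full; the proofs are below) =====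
def Claim_equal_separate_blocks : Prop := ∀ (columns : List (List String)), Dom_separate_blocks columns → Spec_separate_blocks columns (separate_blocks columns)

-- ===== LEMMAS AND PROOFS =====

-- Finishing step of A, abstracted so the loop invariant can be stated.
def sbFinish (st : List (List (List String)) × List (List String)) : List (List (List String)) :=
  if st.2 ≠ [] then st.1 ++ [st.2] else st.1

-- One-step unfolding of B's scan at a separator column.
theorem alt_sep (col : List String) (rest : List (List String)) (hs : sbIsSep col = true) :
    separate_blocks_alt (col :: rest) = separate_blocks_alt rest := by
  rw [separate_blocks_alt]; simp [hs]

-- One-step unfolding of B's scan at a non-separator column.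
theorem alt_nonsep (col : List String) (rest : List (List String)) (hs : ¬ sbIsSep col = true) :
    separate_blocks_alt (col :: rest) =
      (col :: rest.takeWhile (fun c => !(sbIsSep c))) ::
        separate_blocks_alt (rest.dropWhile (fun c => !(sbIsSep c))) := by
  rw [separate_blocks_alt]; simp [hs]

-- Loop invariant: A's fold from any state equals the already-emitted blocks plus —
-- if a block is in progress — that block extended by the leading non-separator run,
-- followed by B's scan of the remainder.
theorem sb_fold_eq (cols : List (List String)) :
    ∀ (blocks : List (List (List String))) (cur : List (List String)),
      sbFinish (cols.foldl sbStep (blocks, cur)) =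
        blocks ++ (if cur = [] then separate_blocks_alt cols
          else (cur ++ cols.takeWhile (fun c => !(sbIsSep c))) ::
            separate_blocks_alt (cols.dropWhile (fun c => !(sbIsSep c)))) := by
  induction cols with
  | nil =>
    intro blocks cur
    by_cases h : cur = [] <;> simp [sbFinish, separate_blocks_alt, h]
  | cons col rest ih =>
    intro blocks cur
    by_cases hs : sbIsSep col = true
    · by_cases h : cur = []
      · rw [List.foldl_cons]
        have hstep : sbStep (blocks, cur) col = (blocks, []) := by
          simp only [sbStep, sbIsSep] at hs ⊢
          simp only [hs, if_true, h, ne_eq, not_true_eq_false, if_false]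
        rw [hstep, ih, alt_sep col rest hs]
        simp [h]
      · rw [List.foldl_cons]
        have hstep : sbStep (blocks, cur) col = (blocks ++ [cur], []) := by
          simp only [sbStep, sbIsSep] at hs ⊢
          simp only [hs, if_true, h, ne_eq, not_false_eq_true, if_true]
        rw [hstep, ih]
        have e2 : List.takeWhile (fun c => !sbIsSep c) (col :: rest) = [] := by
          rw [List.takeWhile_cons]; simp [hs]
        have e3 : List.dropWhile (fun c => !sbIsSep c) (col :: rest) = col :: rest := by
          rw [List.dropWhile_cons]; simp [hs]
        rw [if_pos rfl, if_neg h, e2, e3, alt_sep col rest hs]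
        simp only [List.append_nil, List.append_assoc, List.singleton_append]
    · rw [List.foldl_cons]
      have hstep : sbStep (blocks, cur) col = (blocks, cur ++ [col]) := by
        simp only [sbStep, sbIsSep] at hs ⊢
        simp only [hs, if_false, Bool.false_eq_true]
      rw [hstep, ih]
      have hcc : cur ++ [col] ≠ [] := by simp
      by_cases h : cur = []
      · rw [alt_nonsep col rest hs]
        simp [h]
      · simp [h, hs, hcc]

-- ===== VERDICT (by name: the statement is the Claim_ definition above) =====
theorem separate_blocks_spec : Claim_equal_separate_blocks := by
  intro columns _
  unfold Spec_separate_blocks separate_blocks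
  have h := sb_fold_eq columns [] []
  simpa [sbFinish] using h
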